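-- pv_equiv track=rewrite | github.com/Jagannath-Padhy/ondc_knowledge_base | src/rag/enhanced_rag_chain.py | _group_results_by_source
-- ===== SOURCE A (Python) =====
-- from typing import List, Dict, Any, Optional, Tuple
--
-- def _group_results_by_source(results: List[Dict]) -> Dict[str, List[Dict]]:
--     """Group results by their source type"""
--     grouped = {
--         'pdf_contract': [],
--         'html_contract': [],
--         'yaml_spec': [],
--         'api_endpoints': [],
--         'schemas': [],
--         'examples': [],
--         'enumerations': []
--     }
--
--     for result in results:
--         metadata = result.get('metadata', {})
--         source = metadata.get('source', '')
--         doc_type = metadata.get('type', '')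
--
--         # Group by source
--         if source == 'pdf_contract':
--             grouped['pdf_contract'].append(result)
--         elif source == 'html_contract':
--             grouped['html_contract'].append(result)
--         elif source == 'yaml_spec':
--             grouped['yaml_spec'].append(result)
--
--         # Also group by type
--         if doc_type == 'api_endpoint_master':
--             grouped['api_endpoint_master'] = grouped.get('api_endpoint_master', [])
--             grouped['api_endpoint_master'].append(result)
--         elif doc_type == 'json_example':
--             grouped['json_example'] = grouped.get('json_example', [])
--             grouped['json_example'].append(result)
--         elif doc_type == 'special_topic':
--             grouped['special_topic'] = grouped.get('special_topic', [])
--             grouped['special_topic'].append(result)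
--         elif doc_type == 'cross_reference':
--             grouped['cross_reference'] = grouped.get('cross_reference', [])
--             grouped['cross_reference'].append(result)
--         elif doc_type == 'api_endpoint':
--             grouped['api_endpoints'].append(result)
--         elif doc_type == 'api_endpoint_complete':
--             grouped['api_endpoint_complete'] = grouped.get('api_endpoint_complete', [])
--             grouped['api_endpoint_complete'].append(result)
--         elif doc_type == 'request_payload':
--             grouped['request_payload'] = grouped.get('request_payload', [])
--             grouped['request_payload'].append(result)
--         elif doc_type == 'response_payload':
--             grouped['response_payload'] = grouped.get('response_payload', [])
--             grouped['response_payload'].append(result)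
--         elif doc_type == 'schema':
--             grouped['schemas'].append(result)
--         elif doc_type in ['example']:
--             grouped['examples'].append(result)
--         elif doc_type in ['enumeration', 'enumeration_group', 'enum_definition']:
--             grouped['enumerations'].append(result)
--
--     return grouped
-- ===== SOURCE B (Python) =====
-- # Staged re-implementation: each of the seven seeded buckets is computed by its own
-- # filter pass over results; the dynamic type buckets are then added in first-occurrence
-- # order with one filter pass each (objective: alternative decomposition, not faster).
--
-- _DYNAMIC = {'api_endpoint_master', 'json_example', 'special_topic', 'cross_reference',
--             'api_endpoint_complete', 'request_payload', 'response_payload'}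
--
--
-- def _group_results_by_source(results):
--     def src(r):
--         return r.get('metadata', {}).get('source', '')
--
--     def typ(r):
--         return r.get('metadata', {}).get('type', '')
--
--     grouped = {
--         'pdf_contract': [r for r in results if src(r) == 'pdf_contract'],
--         'html_contract': [r for r in results if src(r) == 'html_contract'],
--         'yaml_spec': [r for r in results if src(r) == 'yaml_spec'],
--         'api_endpoints': [r for r in results if typ(r) == 'api_endpoint'],
--         'schemas': [r for r in results if typ(r) == 'schema'],
--         'examples': [r for r in results if typ(r) == 'example'],
--         'enumerations': [r for r in results
--                          if typ(r) in ('enumeration', 'enumeration_group', 'enum_definition')],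
--     }
--     seen = []
--     for r in results:
--         t = typ(r)
--         if t in _DYNAMIC and t not in seen:
--             seen.append(t)
--     for t in seen:
--         grouped[t] = [r for r in results if typ(r) == t]
--     return grouped
-- ===== Notes on version B (the rewrite author's own statement) =====
-- stated objective: alternative
-- what changed: Replaces A's single accumulator pass with its two if/elif chains by a staged computation: each of the seven seeded buckets is an independent filter comprehension over the input, the dynamic type keys are collected in first-occurrence order in a separate pass, and each dynamic bucket is then filled by its own filter pass.
import Mathlib
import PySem

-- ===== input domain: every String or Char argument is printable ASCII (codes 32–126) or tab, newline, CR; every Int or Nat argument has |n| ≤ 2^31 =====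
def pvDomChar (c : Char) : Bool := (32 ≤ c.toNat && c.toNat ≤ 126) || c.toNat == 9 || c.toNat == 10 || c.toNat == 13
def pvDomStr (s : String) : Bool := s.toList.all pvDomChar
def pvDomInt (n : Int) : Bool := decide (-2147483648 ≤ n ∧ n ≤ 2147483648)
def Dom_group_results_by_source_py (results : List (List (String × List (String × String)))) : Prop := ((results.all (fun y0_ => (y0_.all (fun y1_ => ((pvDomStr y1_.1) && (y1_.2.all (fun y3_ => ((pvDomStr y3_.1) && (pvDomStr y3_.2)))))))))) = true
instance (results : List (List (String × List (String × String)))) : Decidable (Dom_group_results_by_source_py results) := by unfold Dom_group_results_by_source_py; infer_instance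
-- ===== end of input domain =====

-- B replaces A's single accumulator pass (two if/elif chains mutating one dict) by a staged
-- computation: one independent filter pass per seeded bucket, a separate pass collecting the
-- dynamic type keys in first-occurrence order, then one filter pass per dynamic bucket
-- (objective: alternative decomposition; not faster). Both programs are pure (the Python
-- mutates only its local dict); equivalence is about the return value.

abbrev PvRes : Type := List (String × List (String × String))
abbrev PvGrp : Type := PySem.Dict String (List PvRes)

-- ===== PORT A =====
-- grouped = {'pdf_contract': [], …}
def grpInitA : PvGrp := PySem.Dict.mk
  [("pdf_contract", []), ("html_contract", []), ("yaml_spec", []), ("api_endpoints", []),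
   ("schemas", []), ("examples", []), ("enumerations", [])]

-- "# Group by source" if/elif chain of A's loop body
def grpSrcA (grouped : PvGrp) (result : PvRes) (source : String) : PvGrp :=
  if source == "pdf_contract" then grouped.modify "pdf_contract" [] (· ++ [result])
  else if source == "html_contract" then grouped.modify "html_contract" [] (· ++ [result])
  else if source == "yaml_spec" then grouped.modify "yaml_spec" [] (· ++ [result])
  else grouped

-- "# Also group by type" if/elif chain of A's loop body
-- (grouped['k'] = grouped.get('k', []); grouped['k'].append(result))  ↦  insert-then-modify
def grpTypA (grouped : PvGrp) (result : PvRes) (doc_type : String) : PvGrp :=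
  if doc_type == "api_endpoint_master" then
    (grouped.insert "api_endpoint_master" (grouped.getD "api_endpoint_master" [])).modify "api_endpoint_master" [] (· ++ [result])
  else if doc_type == "json_example" then
    (grouped.insert "json_example" (grouped.getD "json_example" [])).modify "json_example" [] (· ++ [result])
  else if doc_type == "special_topic" then
    (grouped.insert "special_topic" (grouped.getD "special_topic" [])).modify "special_topic" [] (· ++ [result])
  else if doc_type == "cross_reference" then
    (grouped.insert "cross_reference" (grouped.getD "cross_reference" [])).modify "cross_reference" [] (· ++ [result])
  else if doc_type == "api_endpoint" then grouped.modify "api_endpoints" [] (· ++ [result])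
  else if doc_type == "api_endpoint_complete" then
    (grouped.insert "api_endpoint_complete" (grouped.getD "api_endpoint_complete" [])).modify "api_endpoint_complete" [] (· ++ [result])
  else if doc_type == "request_payload" then
    (grouped.insert "request_payload" (grouped.getD "request_payload" [])).modify "request_payload" [] (· ++ [result])
  else if doc_type == "response_payload" then
    (grouped.insert "response_payload" (grouped.getD "response_payload" [])).modify "response_payload" [] (· ++ [result])
  else if doc_type == "schema" then grouped.modify "schemas" [] (· ++ [result])
  else if ["example"].contains doc_type then grouped.modify "examples" [] (· ++ [result])
  else if ["enumeration", "enumeration_group", "enum_definition"].contains doc_type then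
    grouped.modify "enumerations" [] (· ++ [result])
  else grouped

def grpStepA (grouped : PvGrp) (result : PvRes) : PvGrp :=
  let metadata := (PySem.Dict.mk result).getD "metadata" []
  let source := (PySem.Dict.mk metadata).getD "source" ""
  let doc_type := (PySem.Dict.mk metadata).getD "type" ""
  grpTypA (grpSrcA grouped result source) result doc_type

def group_results_by_source_py (results : List (List (String × List (String × String)))) : List (String × List (List (String × List (String × String)))) :=
  (results.foldl grpStepA grpInitA).items

-- ===== PORT B =====
-- def src(r): return r.get('metadata', {}).get('source', '')
def pvSrcOf (r : PvRes) : String :=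
  (PySem.Dict.mk ((PySem.Dict.mk r).getD "metadata" [])).getD "source" ""

-- def typ(r): return r.get('metadata', {}).get('type', '')
def pvTypOf (r : PvRes) : String :=
  (PySem.Dict.mk ((PySem.Dict.mk r).getD "metadata" [])).getD "type" ""

-- _DYNAMIC = {…}  (a Python set)
def pvDynamic : PySem.Set String := PySem.Set.ofList
  ["api_endpoint_master", "json_example", "special_topic", "cross_reference",
   "api_endpoint_complete", "request_payload", "response_payload"]

-- grouped = { seven seeded buckets, each its own filter comprehension }
def pvGroupedInit (results : List PvRes) : PvGrp := PySem.Dict.mk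
  [("pdf_contract", results.filter (fun r => pvSrcOf r == "pdf_contract")),
   ("html_contract", results.filter (fun r => pvSrcOf r == "html_contract")),
   ("yaml_spec", results.filter (fun r => pvSrcOf r == "yaml_spec")),
   ("api_endpoints", results.filter (fun r => pvTypOf r == "api_endpoint")),
   ("schemas", results.filter (fun r => pvTypOf r == "schema")),
   ("examples", results.filter (fun r => pvTypOf r == "example")),
   ("enumerations", results.filter (fun r =>
      ["enumeration", "enumeration_group", "enum_definition"].contains (pvTypOf r)))]

-- seen = []; for r in results: t = typ(r); if t in _DYNAMIC and t not in seen: seen.append(t)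
def pvSeenB (results : List PvRes) : List String :=
  results.foldl (fun seen r =>
    let t := pvTypOf r
    if pvDynamic.contains t && !(seen.contains t) then seen ++ [t] else seen) []

def group_results_by_source_py_alt (results : List (List (String × List (String × String)))) : List (String × List (List (String × List (String × String)))) :=
  -- for t in seen: grouped[t] = [r for r in results if typ(r) == t]
  ((pvSeenB results).foldl
    (fun g t => g.insert t (results.filter (fun r => pvTypOf r == t)))
    (pvGroupedInit results)).items

-- ===== PRECONDITION & SPEC =====
def Spec_group_results_by_source_py (results : List (List (String × List (String × String)))) (out : List (String × List (List (String × List (String × String))))) : Prop := out = group_results_by_source_py_alt results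
instance (results : List (List (String × List (String × String)))) (out : List (String × List (List (String × List (String × String))))) : Decidable (Spec_group_results_by_source_py results out) := by
  unfold Spec_group_results_by_source_py
  letI h1 : DecidableEq (List (List (String × List (String × String)))) := inferInstance
  letI h2 : DecidableEq (String × List (List (String × List (String × String)))) := instDecidableEqProd
  infer_instance

-- ===== CLAIM (what is proved, stated in full; the proofs are below) =====
def Claim_equal_group_results_by_source_py : Prop := ∀ (results : List (List (String × List (String × String)))), Dom_group_results_by_source_py results → Spec_group_results_by_source_py results (group_results_by_source_py results)

-- ===== LEMMAS AND PROOFS =====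

-- the seven seeded bucket names, and the dynamic type keys as a plain list
def pvSeeded : List String :=
  ["pdf_contract", "html_contract", "yaml_spec", "api_endpoints", "schemas", "examples", "enumerations"]
def pvDynL : List String :=
  ["api_endpoint_master", "json_example", "special_topic", "cross_reference",
   "api_endpoint_complete", "request_payload", "response_payload"]

-- the bucket a source string lands in, and the bucket a type string lands in
def srcBucketF (s : String) : Option String :=
  if s = "pdf_contract" then some "pdf_contract"
  else if s = "html_contract" then some "html_contract"
  else if s = "yaml_spec" then some "yaml_spec"
  else none

def typBucketF (t : String) : Option String :=
  if t = "api_endpoint_master" then some "api_endpoint_master"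
  else if t = "json_example" then some "json_example"
  else if t = "special_topic" then some "special_topic"
  else if t = "cross_reference" then some "cross_reference"
  else if t = "api_endpoint" then some "api_endpoints"
  else if t = "api_endpoint_complete" then some "api_endpoint_complete"
  else if t = "request_payload" then some "request_payload"
  else if t = "response_payload" then some "response_payload"
  else if t = "schema" then some "schemas"
  else if t = "example" then some "examples"
  else if t = "enumeration" ∨ t = "enumeration_group" ∨ t = "enum_definition" then some "enumerations"
  else none

-- the value every bucket k holds after processing rs (both programs)
def pvValSpec (rs : List PvRes) (k : String) : List PvRes :=
  rs.filter (fun r => srcBucketF (pvSrcOf r) == some k || typBucketF (pvTypOf r) == some k)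

lemma pvDynamic_eq : pvDynamic = pvDynL := by decide

lemma srcBucketF_mem {s k : String} (h : srcBucketF s = some k) :
    k ∈ (["pdf_contract", "html_contract", "yaml_spec"] : List String) := by
  unfold srcBucketF at h
  split_ifs at h <;> first
    | (injection h with h; subst h; decide)
    | simp at h

set_option maxHeartbeats 1000000 in
lemma typBucketF_mem {t k : String} (h : typBucketF t = some k) :
    k ∈ pvDynL ∨ k ∈ (["api_endpoints", "schemas", "examples", "enumerations"] : List String) := by
  unfold typBucketF at h
  split_ifs at h <;> first
    | (injection h with h; subst h; decide)
    | simp at h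

-- the two bucket families are disjoint: no element contributes twice to the same bucket
lemma buckets_disjoint {s t k : String} (hs : srcBucketF s = some k) (ht : typBucketF t = some k) : False := by
  have h1 := srcBucketF_mem hs
  have h2 := typBucketF_mem ht
  simp [pvDynL] at h1 h2
  rcases h1 with rfl | rfl | rfl <;> rcases h2 with (h|h|h|h|h|h|h) | (h|h|h|h) <;> simp_all

lemma valSpec_nil (k : String) : pvValSpec [] k = [] := rfl

lemma valSpec_snoc (rs : List PvRes) (r : PvRes) (k : String) :
    pvValSpec (rs ++ [r]) k =
      pvValSpec rs k ++ (if srcBucketF (pvSrcOf r) = some k then [r] else [])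
        ++ (if typBucketF (pvTypOf r) = some k then [r] else []) := by
  by_cases h1 : srcBucketF (pvSrcOf r) = some k <;>
    by_cases h2 : typBucketF (pvTypOf r) = some k
  · exact (buckets_disjoint h1 h2).elim
  all_goals simp [pvValSpec, List.filter_append, h1, h2]

-- ---- A-side characterization ----

lemma srcA_getD (d : PvGrp) (r : PvRes) (s k : String) :
    (grpSrcA d r s).getD k [] =
      d.getD k [] ++ (if srcBucketF s = some k then [r] else []) := by
  unfold grpSrcA srcBucketF
  by_cases h1 : s = "pdf_contract"
  · by_cases hk : k = "pdf_contract" <;> simp [h1, hk, eq_comm, PySem.Dict.getD_modify]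
  by_cases h2 : s = "html_contract"
  · by_cases hk : k = "html_contract" <;> simp [h1, h2, hk, eq_comm, PySem.Dict.getD_modify]
  by_cases h3 : s = "yaml_spec"
  · by_cases hk : k = "yaml_spec" <;> simp [h1, h2, h3, hk, eq_comm, PySem.Dict.getD_modify]
  · simp [h1, h2, h3]

lemma typA_getD (d : PvGrp) (r : PvRes) (t k : String) :
    (grpTypA d r t).getD k [] =
      d.getD k [] ++ (if typBucketF t = some k then [r] else []) := by
  unfold grpTypA typBucketF
  by_cases h1 : t = "api_endpoint_master"
  · by_cases hk : k = "api_endpoint_master" <;>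
      simp [h1, hk, eq_comm, PySem.Dict.getD_modify, PySem.Dict.getD_insert]
  by_cases h2 : t = "json_example"
  · by_cases hk : k = "json_example" <;>
      simp [h1, h2, hk, eq_comm, PySem.Dict.getD_modify, PySem.Dict.getD_insert]
  by_cases h3 : t = "special_topic"
  · by_cases hk : k = "special_topic" <;>
      simp [h1, h2, h3, hk, eq_comm, PySem.Dict.getD_modify, PySem.Dict.getD_insert]
  by_cases h4 : t = "cross_reference"
  · by_cases hk : k = "cross_reference" <;>
      simp [h1, h2, h3, h4, hk, eq_comm, PySem.Dict.getD_modify, PySem.Dict.getD_insert]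
  by_cases h5 : t = "api_endpoint"
  · by_cases hk : k = "api_endpoints" <;>
      simp [h1, h2, h3, h4, h5, hk, eq_comm, PySem.Dict.getD_modify]
  by_cases h6 : t = "api_endpoint_complete"
  · by_cases hk : k = "api_endpoint_complete" <;>
      simp [h1, h2, h3, h4, h5, h6, hk, eq_comm, PySem.Dict.getD_modify, PySem.Dict.getD_insert]
  by_cases h7 : t = "request_payload"
  · by_cases hk : k = "request_payload" <;>
      simp [h1, h2, h3, h4, h5, h6, h7, hk, eq_comm, PySem.Dict.getD_modify, PySem.Dict.getD_insert]
  by_cases h8 : t = "response_payload"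
  · by_cases hk : k = "response_payload" <;>
      simp [h1, h2, h3, h4, h5, h6, h7, h8, hk, eq_comm, PySem.Dict.getD_modify, PySem.Dict.getD_insert]
  by_cases h9 : t = "schema"
  · by_cases hk : k = "schemas" <;>
      simp [h1, h2, h3, h4, h5, h6, h7, h8, h9, hk, eq_comm, PySem.Dict.getD_modify]
  by_cases h10 : t = "example"
  · by_cases hk : k = "examples" <;>
      simp [h1, h2, h3, h4, h5, h6, h7, h8, h9, h10, hk, eq_comm, PySem.Dict.getD_modify]
  by_cases h11 : t = "enumeration"
  · by_cases hk : k = "enumerations" <;>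
      simp [h1, h2, h3, h4, h5, h6, h7, h8, h9, h10, h11, hk, eq_comm, PySem.Dict.getD_modify]
  by_cases h12 : t = "enumeration_group"
  · by_cases hk : k = "enumerations" <;>
      simp [h1, h2, h3, h4, h5, h6, h7, h8, h9, h10, h11, h12, hk, eq_comm, PySem.Dict.getD_modify]
  by_cases h13 : t = "enum_definition"
  · by_cases hk : k = "enumerations" <;>
      simp [h1, h2, h3, h4, h5, h6, h7, h8, h9, h10, h11, h12, h13, hk, eq_comm, PySem.Dict.getD_modify]
  · simp [h1, h2, h3, h4, h5, h6, h7, h8, h9, h10, h11, h12, h13]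

lemma srcA_keys (d : PvGrp) (r : PvRes) (s : String)
    (h : ∀ k ∈ pvSeeded, d.contains k = true) :
    (grpSrcA d r s).keys = d.keys := by
  unfold grpSrcA
  have c1 := h "pdf_contract" (by decide)
  have c2 := h "html_contract" (by decide)
  have c3 := h "yaml_spec" (by decide)
  split_ifs <;>
    simp [PySem.Dict.keys_modify, PySem.Dict.keys_insert_of_contains _ _ c1,
      PySem.Dict.keys_insert_of_contains _ _ c2, PySem.Dict.keys_insert_of_contains _ _ c3]

lemma typA_keys (d : PvGrp) (r : PvRes) (t : String)
    (h : ∀ k ∈ pvSeeded, d.contains k = true) :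
    (grpTypA d r t).keys =
      d.keys ++ (if pvDynL.contains t && !(d.contains t) then [t] else []) := by
  have c5 := h "api_endpoints" (by decide)
  have c9 := h "schemas" (by decide)
  have c10 := h "examples" (by decide)
  have c11 := h "enumerations" (by decide)
  have hdyn : ∀ L : String, L ∈ pvDynL →
      ((d.insert L (d.getD L [])).modify L [] (· ++ [r])).keys =
        d.keys ++ (if pvDynL.contains L && !(d.contains L) then [L] else []) := by
    intro L hmem
    cases hc : d.contains L with
    | true =>
      rw [PySem.Dict.keys_modify,
        PySem.Dict.keys_insert_of_contains _ _ (by simp [PySem.Dict.contains_insert_self]),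
        PySem.Dict.keys_insert_of_contains _ _ hc]
      simp [hc]
    | false =>
      rw [PySem.Dict.keys_modify,
        PySem.Dict.keys_insert_of_contains _ _ (by simp [PySem.Dict.contains_insert_self]),
        PySem.Dict.keys_insert_of_not_contains _ _ hc]
      simp
      exact hmem
  have hsd : ∀ L L' : String, L' ∈ pvSeeded → L ∉ pvDynL →
      (d.modify L' [] (· ++ [r])).keys =
        d.keys ++ (if pvDynL.contains L && !(d.contains L) then [L] else []) := by
    intro L L' hL' hnd
    rw [PySem.Dict.keys_modify, PySem.Dict.keys_insert_of_contains _ _ (h L' hL'),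
      (by simpa using hnd : pvDynL.contains L = false)]
    simp
  by_cases h1 : t = "api_endpoint_master"
  · subst h1
    rw [show grpTypA d r "api_endpoint_master" = (d.insert "api_endpoint_master" (d.getD "api_endpoint_master" [])).modify "api_endpoint_master" [] (· ++ [r]) from rfl]
    exact hdyn _ (by decide)
  by_cases h2 : t = "json_example"
  · subst h2
    rw [show grpTypA d r "json_example" = (d.insert "json_example" (d.getD "json_example" [])).modify "json_example" [] (· ++ [r]) from rfl]
    exact hdyn _ (by decide)
  by_cases h3 : t = "special_topic"
  · subst h3
    rw [show grpTypA d r "special_topic" = (d.insert "special_topic" (d.getD "special_topic" [])).modify "special_topic" [] (· ++ [r]) from rfl]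
    exact hdyn _ (by decide)
  by_cases h4 : t = "cross_reference"
  · subst h4
    rw [show grpTypA d r "cross_reference" = (d.insert "cross_reference" (d.getD "cross_reference" [])).modify "cross_reference" [] (· ++ [r]) from rfl]
    exact hdyn _ (by decide)
  by_cases h5 : t = "api_endpoint"
  · subst h5
    rw [show grpTypA d r "api_endpoint" = d.modify "api_endpoints" [] (· ++ [r]) from rfl]
    exact hsd _ _ (by decide) (by decide)
  by_cases h6 : t = "api_endpoint_complete"
  · subst h6
    rw [show grpTypA d r "api_endpoint_complete" = (d.insert "api_endpoint_complete" (d.getD "api_endpoint_complete" [])).modify "api_endpoint_complete" [] (· ++ [r]) from rfl]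
    exact hdyn _ (by decide)
  by_cases h7 : t = "request_payload"
  · subst h7
    rw [show grpTypA d r "request_payload" = (d.insert "request_payload" (d.getD "request_payload" [])).modify "request_payload" [] (· ++ [r]) from rfl]
    exact hdyn _ (by decide)
  by_cases h8 : t = "response_payload"
  · subst h8
    rw [show grpTypA d r "response_payload" = (d.insert "response_payload" (d.getD "response_payload" [])).modify "response_payload" [] (· ++ [r]) from rfl]
    exact hdyn _ (by decide)
  by_cases h9 : t = "schema"
  · subst h9
    rw [show grpTypA d r "schema" = d.modify "schemas" [] (· ++ [r]) from rfl]
    exact hsd _ _ (by decide) (by decide)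
  by_cases h10 : t = "example"
  · subst h10
    rw [show grpTypA d r "example" = d.modify "examples" [] (· ++ [r]) from rfl]
    exact hsd _ _ (by decide) (by decide)
  by_cases h11 : t = "enumeration"
  · subst h11
    rw [show grpTypA d r "enumeration" = d.modify "enumerations" [] (· ++ [r]) from rfl]
    exact hsd _ _ (by decide) (by decide)
  by_cases h12 : t = "enumeration_group"
  · subst h12
    rw [show grpTypA d r "enumeration_group" = d.modify "enumerations" [] (· ++ [r]) from rfl]
    exact hsd _ _ (by decide) (by decide)
  by_cases h13 : t = "enum_definition"
  · subst h13
    rw [show grpTypA d r "enum_definition" = d.modify "enumerations" [] (· ++ [r]) from rfl]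
    exact hsd _ _ (by decide) (by decide)
  · have hnd : t ∉ pvDynL := by
      simp only [pvDynL, List.mem_cons, List.not_mem_nil, or_false]
      simp [h1, h2, h3, h4, h6, h7, h8]
    simp [grpTypA, h1, h2, h3, h4, h5, h6, h7, h8, h9, h10, h11, h12, h13,
      (by simpa using hnd : pvDynL.contains t = false)]
    exact fun ht => absurd ht hnd

-- one step of the seen-collecting loop of B
def seenStep (seen : List String) (r : PvRes) : List String :=
  let t := pvTypOf r
  if pvDynamic.contains t && !(seen.contains t) then seen ++ [t] else seen

lemma pvSeenB_eq (rs : List PvRes) : pvSeenB rs = rs.foldl seenStep [] := rfl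

lemma seenB_snoc (rs : List PvRes) (r : PvRes) :
    pvSeenB (rs ++ [r]) =
      pvSeenB rs ++ (if pvDynL.contains (pvTypOf r) && !((pvSeenB rs).contains (pvTypOf r))
                     then [pvTypOf r] else []) := by
  rw [pvSeenB_eq, List.foldl_append, List.foldl_cons, List.foldl_nil, ← pvSeenB_eq]
  rw [show (seenStep (pvSeenB rs) r) =
    (if pvDynL.contains (pvTypOf r) && !((pvSeenB rs).contains (pvTypOf r))
     then pvSeenB rs ++ [pvTypOf r] else pvSeenB rs) from by rw [seenStep, pvDynamic_eq]; rfl]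
  split <;> simp

lemma seen_mem_aux (rs : List PvRes) : ∀ (seen : List String) (t : String),
    t ∈ rs.foldl seenStep seen ↔
      t ∈ seen ∨ (t ∈ pvDynL ∧ ∃ r ∈ rs, pvTypOf r = t) := by
  induction rs with
  | nil => intro seen t; simp
  | cons r rs ih =>
    intro seen t
    rw [List.foldl_cons, ih]
    rw [show seenStep seen r =
      (if pvDynL.contains (pvTypOf r) && !(seen.contains (pvTypOf r))
       then seen ++ [pvTypOf r] else seen) from by rw [seenStep, pvDynamic_eq]; rfl]
    split
    · next hc =>
      have hdyn0 : pvTypOf r ∈ pvDynL := by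
        simp only [Bool.and_eq_true] at hc
        simpa using hc.1
      constructor
      · rintro (h | ⟨hd, r', hr', ht⟩)
        · rcases List.mem_append.mp h with h | h
          · exact .inl h
          · exact .inr ⟨(List.mem_singleton.mp h) ▸ hdyn0, r, by simp,
              ((List.mem_singleton.mp h)).symm⟩
        · exact .inr ⟨hd, r', by simp [hr'], ht⟩
      · rintro (h | ⟨hd, r', hr', ht⟩)
        · exact .inl (List.mem_append.mpr (.inl h))
        · rcases List.mem_cons.mp hr' with rfl | hr''
          · exact .inl (List.mem_append.mpr (.inr (by simp [ht])))
          · exact .inr ⟨hd, r', hr'', ht⟩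
    · next hc =>
      have hc' : pvTypOf r ∈ pvDynL → pvTypOf r ∈ seen := by
        intro hmem
        by_contra hns
        exact hc (by simp [hmem, hns])
      constructor
      · rintro (h | ⟨hd, r', hr', ht⟩)
        · exact .inl h
        · exact .inr ⟨hd, r', by simp [hr'], ht⟩
      · rintro (h | ⟨hd, r', hr', ht⟩)
        · exact .inl h
        · rcases List.mem_cons.mp hr' with rfl | hr''
          · subst ht
            exact .inl (hc' hd)
          · exact .inr ⟨hd, r', hr'', ht⟩

lemma seenB_sub (rs : List PvRes) : ∀ t ∈ pvSeenB rs, t ∈ pvDynL := by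
  intro t ht
  rw [pvSeenB_eq] at ht
  rcases (seen_mem_aux rs [] t).mp ht with h | ⟨hd, _⟩
  · simp at h
  · exact hd

lemma seen_nodup_aux (rs : List PvRes) : ∀ seen : List String,
    seen.Nodup → (rs.foldl seenStep seen).Nodup := by
  induction rs with
  | nil => intro seen h; simpa
  | cons r rs ih =>
    intro seen h
    rw [List.foldl_cons]
    apply ih
    rw [seenStep]
    split
    · next hc =>
      simp only [Bool.and_eq_true, Bool.not_eq_true'] at hc
      have hnm : pvTypOf r ∉ seen := by simpa using hc.2
      simp [List.nodup_append, h]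
      exact fun a ha hb => hnm (hb ▸ ha)
    · exact h

lemma seenB_nodup (rs : List PvRes) : (pvSeenB rs).Nodup := by
  rw [pvSeenB_eq]; exact seen_nodup_aux rs [] (by simp)

-- every dynamic type that occurs in rs is recorded in pvSeenB rs
lemma seenB_complete (rs : List PvRes) (t : String) (hd : t ∈ pvDynL)
    (hn : t ∉ pvSeenB rs) : rs.filter (fun r => pvTypOf r == t) = [] := by
  rw [List.filter_eq_nil_iff]
  intro r hr
  simp only [beq_iff_eq]
  intro ht
  exact hn (by rw [pvSeenB_eq]; exact (seen_mem_aux rs [] t).mpr (.inr ⟨hd, r, hr, ht⟩))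

lemma dyn_not_seeded : ∀ t ∈ pvDynL, t ∉ pvSeeded := by decide

lemma grpStepA_eq (d : PvGrp) (r : PvRes) :
    grpStepA d r = grpTypA (grpSrcA d r (pvSrcOf r)) r (pvTypOf r) := rfl

lemma initA_getD (k : String) : grpInitA.getD k [] = [] := by
  simp only [grpInitA, PySem.Dict.getD_eq_get?_getD, PySem.Dict.get?_mk_cons]
  split_ifs <;> simp [PySem.Dict.get?]

-- the A fold, characterized: its keys and every bucket's value
lemma foldA_char (rs : List PvRes) :
    (rs.foldl grpStepA grpInitA).keys = pvSeeded ++ pvSeenB rs ∧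
    ∀ k, (rs.foldl grpStepA grpInitA).getD k [] = pvValSpec rs k := by
  induction rs using List.reverseRecOn with
  | nil =>
    constructor
    · decide
    · intro k; simp only [List.foldl_nil]; rw [valSpec_nil, initA_getD]
  | append_singleton rs r ih =>
    obtain ⟨hK, hG⟩ := ih
    rw [List.foldl_append, List.foldl_cons, List.foldl_nil]
    have hCont : ∀ k ∈ pvSeeded, (rs.foldl grpStepA grpInitA).contains k = true := by
      intro k hk
      rw [PySem.Dict.contains_iff_mem_keys, hK]
      exact List.mem_append.mpr (.inl hk)
    have hCont2 : ∀ k ∈ pvSeeded,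
        (grpSrcA (rs.foldl grpStepA grpInitA) r (pvSrcOf r)).contains k = true := by
      intro k hk
      rw [PySem.Dict.contains_iff_mem_keys, srcA_keys _ _ _ hCont,
        ← PySem.Dict.contains_iff_mem_keys]
      exact hCont k hk
    constructor
    · rw [grpStepA_eq, typA_keys _ _ _ hCont2, srcA_keys _ _ _ hCont, hK, seenB_snoc,
        ← List.append_assoc]
      have hct : (grpSrcA (rs.foldl grpStepA grpInitA) r (pvSrcOf r)).contains (pvTypOf r)
          = (rs.foldl grpStepA grpInitA).contains (pvTypOf r) := by
        rw [PySem.Dict.contains_eq_decide_mem_keys, PySem.Dict.contains_eq_decide_mem_keys,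
          srcA_keys _ _ _ hCont]
      rw [hct]
      by_cases hd : pvTypOf r ∈ pvDynL
      · have hns := dyn_not_seeded _ hd
        have e1 : (rs.foldl grpStepA grpInitA).contains (pvTypOf r)
            = (pvSeenB rs).contains (pvTypOf r) := by
          rw [PySem.Dict.contains_eq_decide_mem_keys, hK]
          by_cases hs : pvTypOf r ∈ pvSeenB rs <;> simp [List.mem_append, hns, hs]
        rw [e1]
      · simp [hd]
    · intro k
      rw [grpStepA_eq, typA_getD, srcA_getD, hG, valSpec_snoc]

-- ---- B-side characterization ----

-- the dict B builds, before .items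
def pvAltD (rs : List PvRes) : PvGrp :=
  (pvSeenB rs).foldl
    (fun g t => g.insert t (rs.filter (fun r => pvTypOf r == t)))
    (pvGroupedInit rs)

lemma alt_eq (rs : List PvRes) :
    group_results_by_source_py_alt rs = (pvAltD rs).items := rfl

lemma baseB_keys (rs : List PvRes) : (pvGroupedInit rs).keys = pvSeeded := by
  simp [pvGroupedInit, PySem.Dict.keys_mk, pvSeeded]

lemma altD_items (rs : List PvRes) :
    (pvAltD rs).items = (pvGroupedInit rs).items ++
      (pvSeenB rs).map (fun t => (t, rs.filter (fun r => pvTypOf r == t))) := by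
  unfold pvAltD
  exact PySem.Dict.items_foldl_insert_fresh (pvSeenB rs) (fun t => t)
    (fun t => rs.filter (fun r => pvTypOf r == t)) (pvGroupedInit rs)
    (fun a ha => by
      rw [PySem.Dict.contains_eq_decide_mem_keys, baseB_keys]
      simp [dyn_not_seeded a (seenB_sub rs a ha)])
    (by simpa using seenB_nodup rs)

lemma altD_keys (rs : List PvRes) : (pvAltD rs).keys = pvSeeded ++ pvSeenB rs := by
  have h := congrArg (List.map (fun p : String × List PvRes => p.1)) (altD_items rs)
  simp only [List.map_append, List.map_map] at h
  rw [show (pvAltD rs).keys = ((pvAltD rs).items.map (fun p => p.1)) from rfl, h,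
    show ((fun p : String × List PvRes => p.1) ∘
      fun t => (t, List.filter (fun r => pvTypOf r == t) rs)) = id from rfl, List.map_id,
    show List.map (fun p : String × List PvRes => p.1) (pvGroupedInit rs).items
      = pvSeeded from rfl]

lemma keys_nodup (rs : List PvRes) : (pvSeeded ++ pvSeenB rs).Nodup := by
  rw [List.nodup_append]
  refine ⟨by decide, seenB_nodup rs, ?_⟩
  intro a ha b hb
  rintro rfl
  exact dyn_not_seeded a (seenB_sub rs a hb) ha

-- bucket-by-bucket: pvValSpec agrees with B's filters

set_option maxHeartbeats 1600000 in
lemma typ_ne_src (t k : String)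
    (hk : k ∈ (["pdf_contract", "html_contract", "yaml_spec"] : List String)) :
    (typBucketF t == some k) = false := by
  cases e : typBucketF t with
  | none => rfl
  | some b =>
    simp only [beq_eq_false_iff_ne, ne_eq, Option.some.injEq]
    rintro rfl
    simp only [List.mem_cons, List.not_mem_nil, or_false] at hk
    rcases typBucketF_mem e with h | h <;>
      rcases hk with rfl | rfl | rfl <;> simp_all [pvDynL]

set_option maxHeartbeats 1600000 in
lemma src_ne_typ (s k : String)
    (hk : k ∈ pvDynL ∨ k ∈ (["api_endpoints", "schemas", "examples", "enumerations"] : List String)) :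
    (srcBucketF s == some k) = false := by
  cases e : srcBucketF s with
  | none => rfl
  | some b =>
    simp only [beq_eq_false_iff_ne, ne_eq, Option.some.injEq]
    rintro rfl
    have h := srcBucketF_mem e
    simp only [List.mem_cons, List.not_mem_nil, or_false] at h
    rcases hk with h' | h' <;>
      rcases h with rfl | rfl | rfl <;> simp_all [pvDynL]

set_option maxHeartbeats 1600000 in
lemma val_src (rs : List PvRes) (k : String)
    (hk : k ∈ (["pdf_contract", "html_contract", "yaml_spec"] : List String)) :
    pvValSpec rs k = rs.filter (fun r => pvSrcOf r == k) := by
  unfold pvValSpec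
  apply List.filter_congr
  intro r _
  rw [typ_ne_src _ k hk, Bool.or_false]
  simp only [List.mem_cons, List.not_mem_nil, or_false] at hk
  unfold srcBucketF
  rcases hk with rfl | rfl | rfl <;> split_ifs <;> simp_all

set_option maxHeartbeats 1600000 in
lemma val_api (rs : List PvRes) :
    pvValSpec rs "api_endpoints" = rs.filter (fun r => pvTypOf r == "api_endpoint") := by
  unfold pvValSpec
  apply List.filter_congr
  intro r _
  rw [src_ne_typ _ _ (.inr (by decide)), Bool.false_or]
  unfold typBucketF
  split_ifs <;> simp_all

set_option maxHeartbeats 1600000 in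
lemma val_schemas (rs : List PvRes) :
    pvValSpec rs "schemas" = rs.filter (fun r => pvTypOf r == "schema") := by
  unfold pvValSpec
  apply List.filter_congr
  intro r _
  rw [src_ne_typ _ _ (.inr (by decide)), Bool.false_or]
  unfold typBucketF
  split_ifs <;> simp_all

set_option maxHeartbeats 1600000 in
lemma val_examples (rs : List PvRes) :
    pvValSpec rs "examples" = rs.filter (fun r => pvTypOf r == "example") := by
  unfold pvValSpec
  apply List.filter_congr
  intro r _
  rw [src_ne_typ _ _ (.inr (by decide)), Bool.false_or]
  unfold typBucketF
  split_ifs <;> simp_all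

set_option maxHeartbeats 1600000 in
lemma val_enums (rs : List PvRes) :
    pvValSpec rs "enumerations" = rs.filter (fun r =>
      ["enumeration", "enumeration_group", "enum_definition"].contains (pvTypOf r)) := by
  unfold pvValSpec
  apply List.filter_congr
  intro r _
  rw [src_ne_typ _ _ (.inr (by decide)), Bool.false_or]
  unfold typBucketF
  split_ifs <;> simp_all

set_option maxHeartbeats 1000000 in
lemma typBucketF_dyn_inv {t k : String} (h : typBucketF t = some k) (hk : k ∈ pvDynL) :
    t = k := by
  unfold typBucketF at h
  split_ifs at h <;>
    (injection h with h; subst h; first | assumption | exact absurd hk (by decide))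

lemma typBucketF_dyn_eq (t k : String) (hk : k ∈ pvDynL) :
    (typBucketF t == some k) = (t == k) := by
  by_cases ht : t = k
  · rw [ht]
    have hk' : k ∈ (["api_endpoint_master", "json_example", "special_topic", "cross_reference",
        "api_endpoint_complete", "request_payload", "response_payload"] : List String) := hk
    simp only [List.mem_cons, List.not_mem_nil, or_false] at hk'
    rcases hk' with rfl | rfl | rfl | rfl | rfl | rfl | rfl <;> decide
  · rw [(by simpa using ht : (t == k) = false)]
    cases e : typBucketF t with
    | none => rfl
    | some b =>
      simp only [beq_eq_false_iff_ne, ne_eq, Option.some.injEq]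
      rintro rfl
      exact ht (typBucketF_dyn_inv e hk)

lemma val_dyn (rs : List PvRes) (k : String) (hk : k ∈ pvDynL) :
    pvValSpec rs k = rs.filter (fun r => pvTypOf r == k) := by
  unfold pvValSpec
  apply List.filter_congr
  intro r _
  rw [src_ne_typ _ _ (.inl hk), Bool.false_or, typBucketF_dyn_eq _ _ hk]

-- pvValSpec of a bucket that exists in neither program's output is empty
lemma valSpec_absent (rs : List PvRes) (k : String)
    (hk1 : k ∉ pvSeeded) (hk2 : k ∉ pvSeenB rs) : pvValSpec rs k = [] := by
  unfold pvValSpec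
  rw [List.filter_eq_nil_iff]
  intro r hr
  simp only [Bool.or_eq_true, beq_iff_eq, not_or]
  constructor
  · intro hs
    exact hk1 (by
      have hmem := srcBucketF_mem hs
      simp only [List.mem_cons, List.not_mem_nil, or_false] at hmem
      rcases hmem with rfl | rfl | rfl <;> decide)
  · intro ht
    rcases typBucketF_mem ht with hd | hs
    · have htk := typBucketF_dyn_inv ht hd
      have : rs.filter (fun r => pvTypOf r == k) = [] := seenB_complete rs k hd hk2
      rw [List.filter_eq_nil_iff] at this
      exact absurd (by simpa using htk) (this r hr)
    · exact hk1 (by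
        simp only [List.mem_cons, List.not_mem_nil, or_false] at hs
        rcases hs with rfl | rfl | rfl | rfl <;> decide)

lemma altD_getD (rs : List PvRes) (k : String) :
    (pvAltD rs).getD k [] = pvValSpec rs k := by
  have hnd : (pvAltD rs).keys.Nodup := by rw [altD_keys]; exact keys_nodup rs
  by_cases hk1 : k ∈ pvSeeded
  · have hk1' : k ∈ (["pdf_contract", "html_contract", "yaml_spec", "api_endpoints",
        "schemas", "examples", "enumerations"] : List String) := hk1
    simp only [List.mem_cons, List.not_mem_nil, or_false] at hk1'
    rcases hk1' with rfl | rfl | rfl | rfl | rfl | rfl | rfl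
    · exact (PySem.Dict.getD_of_mem_items (pvAltD rs)
        (v := rs.filter (fun r => pvSrcOf r == "pdf_contract"))
        (by rw [altD_items]; simp [pvGroupedInit]) hnd []).trans (val_src rs _ (by decide)).symm
    · exact (PySem.Dict.getD_of_mem_items (pvAltD rs)
        (v := rs.filter (fun r => pvSrcOf r == "html_contract"))
        (by rw [altD_items]; simp [pvGroupedInit]) hnd []).trans (val_src rs _ (by decide)).symm
    · exact (PySem.Dict.getD_of_mem_items (pvAltD rs)
        (v := rs.filter (fun r => pvSrcOf r == "yaml_spec"))
        (by rw [altD_items]; simp [pvGroupedInit]) hnd []).trans (val_src rs _ (by decide)).symm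
    · exact (PySem.Dict.getD_of_mem_items (pvAltD rs)
        (v := rs.filter (fun r => pvTypOf r == "api_endpoint"))
        (by rw [altD_items]; simp [pvGroupedInit]) hnd []).trans (val_api rs).symm
    · exact (PySem.Dict.getD_of_mem_items (pvAltD rs)
        (v := rs.filter (fun r => pvTypOf r == "schema"))
        (by rw [altD_items]; simp [pvGroupedInit]) hnd []).trans (val_schemas rs).symm
    · exact (PySem.Dict.getD_of_mem_items (pvAltD rs)
        (v := rs.filter (fun r => pvTypOf r == "example"))
        (by rw [altD_items]; simp [pvGroupedInit]) hnd []).trans (val_examples rs).symm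
    · exact (PySem.Dict.getD_of_mem_items (pvAltD rs)
        (v := rs.filter (fun r => ["enumeration", "enumeration_group", "enum_definition"].contains (pvTypOf r)))
        (by rw [altD_items]; simp [pvGroupedInit]) hnd []).trans (val_enums rs).symm
  · by_cases hk2 : k ∈ pvSeenB rs
    · exact (PySem.Dict.getD_of_mem_items (pvAltD rs)
        (v := rs.filter (fun r => pvTypOf r == k))
        (by rw [altD_items]
            exact List.mem_append.mpr (.inr (List.mem_map.mpr ⟨k, hk2, rfl⟩))) hnd []).trans
        (val_dyn rs k (seenB_sub rs k hk2)).symm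
    · rw [PySem.Dict.getD_of_not_contains _ _ (by
        rw [PySem.Dict.contains_eq_decide_mem_keys, altD_keys]
        simp [List.mem_append, hk1, hk2]), valSpec_absent rs k hk1 hk2]

-- ===== VERDICT (by name: the statement is the Claim_ definition above) =====
theorem group_results_by_source_py_spec : Claim_equal_group_results_by_source_py := by
  intro results _
  unfold Spec_group_results_by_source_py group_results_by_source_py
  obtain ⟨hKA, hGA⟩ := foldA_char results
  rw [alt_eq]
  rw [PySem.Dict.items_eq_map_keys _ (by rw [hKA]; exact keys_nodup results) [],
    PySem.Dict.items_eq_map_keys _ (by rw [altD_keys]; exact keys_nodup results) [],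
    hKA, altD_keys]
  apply List.map_congr_left
  intro k _
  rw [hGA, altD_getD]
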